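-- pv_equiv track=rewrite | github.com/Massprod/leetcode-testing | leetcode_problems/p1592_rearrange_spaces_between_words.py | reorder_space
-- ===== SOURCE A (Python) =====
-- def reorder_space(text: str) -> str:
--     # working_sol (88.56%, 80.30%) -> (29ms, 16.45mb)  time: O(n) | space: O(n)
--     spaces: int = 0
--     words: list[str] = []
--     cur_word: list[str] = []
--     for char in text:
--         if ' ' != char:
--             cur_word.append(char)
--         else:
--             if cur_word:
--                 words.append(''.join(cur_word))
--             cur_word = []
--             spaces += 1
--     if cur_word:
--         words.append(''.join(cur_word))
--     required_space_chunks: int = len(words) - 1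
--     if 0 == required_space_chunks:
--         return ''.join(words) + ' ' * spaces
--     leftovers: int = spaces % required_space_chunks
--     size: int = spaces // required_space_chunks
--     space_string: str = ' ' * size
--     out: str = space_string.join(words) + ' ' * leftovers
--     return out
-- ===== SOURCE B (Python) =====
-- def reorder_space(text: str) -> str:
--     # Two-pointer index scan extracts the words; the output is a preallocated
--     # space-filled buffer of len(text) into which the words are written at
--     # computed offsets (no join, no space counting: leftover spaces fill the
--     # buffer tail implicitly).
--     words = []
--     i, n = 0, len(text)
--     while i < n:
--         if text[i] == ' ':
--             i += 1
--             continue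
--         j = i
--         while j < n and text[j] != ' ':
--             j += 1
--         words.append(text[i:j])
--         i = j
--     buf = [' '] * n
--     gap = 0
--     if len(words) > 1:
--         gap = (n - sum(map(len, words))) // (len(words) - 1)
--     pos = 0
--     for w in words:
--         buf[pos:pos + len(w)] = w
--         pos += len(w) + gap
--     return ''.join(buf)
-- ===== Notes on version B (the rewrite author's own statement) =====
-- stated objective: alternative
-- what changed: replaces A's per-character state machine plus string joins by a two-pointer index scan that extracts the words and a preallocated space-filled buffer of len(text) into which the words are written at computed offsets; the space count is derived arithmetically as len(text) minus the total word length and the leftover spaces fill the buffer tail implicitly instead of being appended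
-- intended difference: on non-empty text consisting only of spaces A's required_space_chunks is -1 and it returns the empty string (the spaces are lost), while B returns the text unchanged, which is the intended value since the output must keep all spaces — e.g. on reorder_space(" "): A returns "", B returns " "
import Mathlib
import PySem

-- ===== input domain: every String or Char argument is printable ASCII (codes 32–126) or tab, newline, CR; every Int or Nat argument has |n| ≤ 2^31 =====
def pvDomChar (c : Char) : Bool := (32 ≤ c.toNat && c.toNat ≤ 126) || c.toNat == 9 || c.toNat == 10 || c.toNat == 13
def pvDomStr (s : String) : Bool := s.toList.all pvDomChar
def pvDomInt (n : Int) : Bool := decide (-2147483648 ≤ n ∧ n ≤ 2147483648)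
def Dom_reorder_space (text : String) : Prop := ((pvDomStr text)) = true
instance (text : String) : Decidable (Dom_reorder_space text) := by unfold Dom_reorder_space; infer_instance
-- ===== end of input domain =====

-- B replaces A's per-character state machine and string joins by a two-pointer index scan that
-- extracts the words and a preallocated space-filled buffer into which the words are written at
-- computed offsets; on non-empty all-space text A returns the empty string while B keeps the spaces — stated
-- below as D_reorder_space.

-- ===== PORT A =====
-- the 'for char in text' loop: state (spaces, words, cur_word)
def reorderSpaceLoop : List Char → Int → List (List Char) → List Char →
    Int × List (List Char) × List Char
  | [], spaces, words, cur => (spaces, words, cur)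
  | c :: t, spaces, words, cur =>
    if c ≠ ' ' then
      reorderSpaceLoop t spaces words (cur ++ [c])
    else
      reorderSpaceLoop t (spaces + 1) (if cur ≠ [] then words ++ [cur] else words) []

def reorder_space (text : String) : String :=
  let r := reorderSpaceLoop text.toList 0 [] []
  let spaces := r.1
  let words := if r.2.2 ≠ [] then r.2.1 ++ [r.2.2] else r.2.1
  let required : Int := (words.length : Int) - 1
  if 0 = required then
    String.ofList (PySem.Chars.join [] words ++ PySem.List.pyRepeat [' '] spaces)
  else
    let leftovers := PySem.Int.mod spaces required
    let size := PySem.Int.floordiv spaces required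
    String.ofList (PySem.Chars.join (PySem.List.pyRepeat [' '] size) words ++
               PySem.List.pyRepeat [' '] leftovers)

-- ===== PORT B =====
-- the outer 'while i < n' word scan of Source B: fuel = number of characters left, so the
-- recursion is structural; the inner 'while j < n and text[j] != " "' is the takeWhile /
-- dropWhile span at the current position (exact: both stop at the first space or the end)
def scanWords : Nat → List Char → List (List Char)
  | 0, _ => []
  | _, [] => []
  | fuel + 1, c :: t =>
    if c = ' ' then scanWords fuel t
    else (c :: t.takeWhile (· ≠ ' ')) :: scanWords fuel (t.dropWhile (· ≠ ' '))

-- buf[pos:pos+len(w)] = w  (exact whenever pos + len(w) ≤ len(buf), which holds at every call)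
def writeAt (buf : List Char) (pos : Nat) (w : List Char) : List Char :=
  buf.take pos ++ w ++ buf.drop (pos + w.length)

def reorder_space_alt (text : String) : String :=
  let l := text.toList
  let n := l.length
  let words := scanWords n l
  -- gap = (n - sum(map(len, words))) // (len(words) - 1): all quantities are nonnegative,
  -- so Nat subtraction and division are exact here
  let gap : Nat := if 1 < words.length
    then (n - (words.map List.length).sum) / (words.length - 1) else 0
  let r := words.foldl (fun (st : List Char × Nat) w =>
      (writeAt st.1 st.2 w, st.2 + w.length + gap)) (List.replicate n ' ', 0)
  String.ofList r.1

-- ===== PRECONDITION & SPEC =====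
-- On non-empty text consisting only of spaces, A's required_space_chunks is -1 and it returns the empty string
-- (the spaces are lost), while B returns the text unchanged, the intended value.
def D_reorder_space (text : String) : Prop :=
  text.toList ≠ [] ∧ ∀ c ∈ text.toList, c = ' '
instance (text : String) : Decidable (D_reorder_space text) := by
  unfold D_reorder_space; infer_instance

def Spec_reorder_space (text : String) (out : String) : Prop :=
  ¬ D_reorder_space text → out = reorder_space_alt text
instance (text : String) (out : String) : Decidable (Spec_reorder_space text out) := by
  unfold Spec_reorder_space; infer_instance

def pvDiffWitness_reorder_space : String := " "
def pvDiffWitnessOut_reorder_space : String × String := ("", " ")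

-- ===== CLAIM (what is proved, stated in full; the proofs are below) =====
def Claim_unchanged_reorder_space : Prop :=
  ∀ (text : String), Dom_reorder_space text → Spec_reorder_space text (reorder_space text)
def Claim_changed_reorder_space : Prop :=
  Dom_reorder_space (pvDiffWitness_reorder_space) ∧ D_reorder_space (pvDiffWitness_reorder_space) ∧
  reorder_space (pvDiffWitness_reorder_space) = pvDiffWitnessOut_reorder_space.1 ∧
  reorder_space_alt (pvDiffWitness_reorder_space) = pvDiffWitnessOut_reorder_space.2 ∧
  pvDiffWitnessOut_reorder_space.1 ≠ pvDiffWitnessOut_reorder_space.2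
def Claim_exact_reorder_space : Prop :=
  ∀ (text : String), Dom_reorder_space text → D_reorder_space text →
    reorder_space text ≠ reorder_space_alt text

-- ===== LEMMAS AND PROOFS =====

-- the non-empty pieces of text.split(' ') — the common characterisation of both word lists
def wordsFrom : List Char → List Char → List (List Char)
  | cur, [] => if cur ≠ [] then [cur] else []
  | cur, c :: t => if c = ' ' then (if cur ≠ [] then [cur] else []) ++ wordsFrom [] t
                   else wordsFrom (cur ++ [c]) t

theorem loopA_spec (l : List Char) (spaces : Int) (words : List (List Char)) (cur : List Char) :
    (if (reorderSpaceLoop l spaces words cur).2.2 ≠ [] then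
        (reorderSpaceLoop l spaces words cur).2.1 ++ [(reorderSpaceLoop l spaces words cur).2.2]
      else (reorderSpaceLoop l spaces words cur).2.1) = words ++ wordsFrom cur l ∧
    (reorderSpaceLoop l spaces words cur).1 = spaces + (l.count ' ' : Int) := by
  induction l generalizing spaces words cur with
  | nil =>
    by_cases h : cur = [] <;> simp [reorderSpaceLoop, wordsFrom, h]
  | cons c t ih =>
    by_cases hc : c = ' '
    · subst hc
      rw [show reorderSpaceLoop (' '::t) spaces words cur
            = reorderSpaceLoop t (spaces + 1) (if cur ≠ [] then words ++ [cur] else words) [] by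
          simp [reorderSpaceLoop]]
      obtain ⟨h1, h2⟩ := ih (spaces + 1) (if cur ≠ [] then words ++ [cur] else words) []
      constructor
      · rw [h1]
        by_cases h : cur = [] <;> simp [wordsFrom, h]
      · rw [h2]; simp; ring
    · rw [show reorderSpaceLoop (c::t) spaces words cur
            = reorderSpaceLoop t spaces words (cur ++ [c]) by
          simp [reorderSpaceLoop, hc]]
      obtain ⟨h1, h2⟩ := ih spaces words (cur ++ [c])
      constructor
      · rw [h1]; simp [wordsFrom, hc]
      · rw [h2]; simp [hc]

theorem wordsFrom_word (t : List Char) (cur : List Char) (h : cur ≠ []) :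
    wordsFrom cur t = (cur ++ t.takeWhile (· ≠ ' ')) :: wordsFrom [] (t.dropWhile (· ≠ ' ')) := by
  induction t generalizing cur with
  | nil => simp [wordsFrom, h]
  | cons c t ih =>
    by_cases hc : c = ' '
    · subst hc
      have h1 : wordsFrom cur (' '::t) = [cur] ++ wordsFrom [] t := by simp [wordsFrom, h]
      have h2 : wordsFrom ([] : List Char) (' '::t) = wordsFrom [] t := by simp [wordsFrom]
      simp [h1, List.takeWhile, List.dropWhile, h2]
    · have h1 : wordsFrom cur (c::t) = wordsFrom (cur ++ [c]) t := by simp [wordsFrom, hc]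
      rw [h1, ih (cur ++ [c]) (by simp)]
      simp [List.takeWhile, List.dropWhile, hc]

theorem scanWords_eq (fuel : Nat) (l : List Char) (h : l.length ≤ fuel) :
    scanWords fuel l = wordsFrom [] l := by
  induction fuel generalizing l with
  | zero =>
    have : l = [] := by cases l <;> simp_all
    simp [this, scanWords, wordsFrom]
  | succ n ih =>
    cases l with
    | nil => simp [scanWords, wordsFrom]
    | cons c t =>
      by_cases hc : c = ' '
      · subst hc
        have : scanWords (n+1) (' '::t) = scanWords n t := by simp [scanWords]
        rw [this, ih t (by simpa using h)]
        simp [wordsFrom]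
      · have h1 : scanWords (n+1) (c::t)
            = (c :: t.takeWhile (· ≠ ' ')) :: scanWords n (t.dropWhile (· ≠ ' ')) := by
          simp [scanWords, hc]
        have h2 : wordsFrom ([] : List Char) (c::t) = wordsFrom [c] t := by
          simp [wordsFrom, hc]
        rw [h1, ih _ (le_trans (List.length_dropWhile_le _ t) (by simpa using h)),
          h2, wordsFrom_word t [c] (by simp)]
        simp

theorem sum_len_wordsFrom (l : List Char) : ∀ cur : List Char,
    ((wordsFrom cur l).map List.length).sum + l.count ' ' = cur.length + l.length := by
  induction l with
  | nil => intro cur; by_cases h : cur = [] <;> simp [wordsFrom, h]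
  | cons c t ih =>
    intro cur
    by_cases hc : c = ' '
    · subst hc
      have h1 : wordsFrom cur (' '::t) = (if cur ≠ [] then [cur] else []) ++ wordsFrom [] t := by
        simp [wordsFrom]
      have h2 := ih ([] : List Char)
      simp only [List.length_nil, zero_add] at h2
      rw [h1]
      by_cases h : cur = [] <;> simp [h] <;> omega
    · have h1 : wordsFrom cur (c::t) = wordsFrom (cur ++ [c]) t := by simp [wordsFrom, hc]
      have h2 := ih (cur ++ [c])
      rw [h1, List.count_cons]
      simp only [List.length_append, List.length_cons, List.length_nil, zero_add] at h2 ⊢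
      simp [hc]
      omega

theorem wordsFrom_ne_nil (l : List Char) (cur : List Char)
    (h : cur ≠ [] ∨ ∃ c ∈ l, c ≠ ' ') : wordsFrom cur l ≠ [] := by
  induction l generalizing cur with
  | nil =>
    rcases h with h | h
    · simp [wordsFrom, h]
    · simp at h
  | cons c t ih =>
    by_cases hc : c = ' '
    · subst hc
      have hrec : wordsFrom cur (' '::t) = (if cur ≠ [] then [cur] else []) ++ wordsFrom [] t := by
        simp [wordsFrom]
      rw [hrec]
      rcases h with h | h
      · simp [h]
      · obtain ⟨d, hd, hne⟩ := h
        simp at hd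
        rcases hd with hd | hd
        · exact absurd hd hne
        · intro hcon
          rw [List.append_eq_nil_iff] at hcon
          exact ih [] (Or.inr ⟨d, hd, hne⟩) hcon.2
    · have hrec : wordsFrom cur (c::t) = wordsFrom (cur ++ [c]) t := by simp [wordsFrom, hc]
      rw [hrec]
      exact ih (cur ++ [c]) (Or.inl (by simp))

theorem wordsFrom_nil_of_all_space (l : List Char) (h : ∀ c ∈ l, c = ' ') :
    wordsFrom [] l = [] := by
  induction l with
  | nil => simp [wordsFrom]
  | cons c t ih =>
    have hc : c = ' ' := h c (by simp)
    subst hc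
    have hrec : wordsFrom ([] : List Char) (' '::t) = wordsFrom [] t := by simp [wordsFrom]
    rw [hrec]
    exact ih (fun d hd => h d (by simp [hd]))

theorem writeAt_prefix (P R w : List Char) :
    writeAt (P ++ R) P.length w = P ++ w ++ R.drop w.length := by
  unfold writeAt
  rw [List.take_left, List.drop_append]
  simp

theorem place_spec (gap : Nat) (ws : List (List Char)) :
    ∀ (P : List Char) (m : Nat),
    (ws.map List.length).sum + gap * (ws.length - 1) ≤ m →
    (ws.foldl (fun (st : List Char × Nat) w => (writeAt st.1 st.2 w, st.2 + w.length + gap))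
        (P ++ List.replicate m ' ', P.length)).1
      = P ++ PySem.Chars.join (List.replicate gap ' ') ws
          ++ List.replicate (m - ((ws.map List.length).sum + gap * (ws.length - 1))) ' ' := by
  induction ws with
  | nil => intro P m h; simp [PySem.Chars.join_nil]
  | cons w ws ih =>
    intro P m h
    rcases ws with _ | ⟨v, vs⟩
    · simp only [List.foldl_cons, List.foldl_nil]
      rw [writeAt_prefix P (List.replicate m ' ') w, List.drop_replicate,
        PySem.Chars.join_singleton]
      simp
    · have hmul : gap * ((w :: v :: vs).length - 1) = gap * vs.length + gap := by
        simp [Nat.mul_succ]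
      have hS : 0 ≤ ((v :: vs).map List.length).sum := Nat.zero_le _
      have hw_le : w.length + gap ≤ m := by
        rw [hmul] at h
        simp only [List.map_cons, List.sum_cons] at h
        omega
      rw [List.foldl_cons, writeAt_prefix P (List.replicate m ' ') w, List.drop_replicate]
      have hsplit : List.replicate (m - w.length) ' '
          = List.replicate gap ' ' ++ List.replicate (m - w.length - gap) ' ' := by
        rw [← List.replicate_add]
        congr 1
        omega
      rw [hsplit]
      have hP : P ++ w ++ (List.replicate gap ' ' ++ List.replicate (m - w.length - gap) ' ')
          = (P ++ w ++ List.replicate gap ' ') ++ List.replicate (m - w.length - gap) ' ' := by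
        simp
      have hpos : P.length + w.length + gap = (P ++ w ++ List.replicate gap ' ').length := by
        simp only [List.length_append, List.length_replicate]
      have hcond : ((v :: vs).map List.length).sum + gap * ((v :: vs).length - 1)
          ≤ m - w.length - gap := by
        rw [hmul] at h
        simp only [List.map_cons, List.sum_cons, List.length_cons, Nat.add_sub_cancel] at h ⊢
        omega
      rw [hP, hpos, ih (P ++ w ++ List.replicate gap ' ') (m - w.length - gap) hcond,
        PySem.Chars.join_cons_cons]
      have hcnt : (m - w.length - gap)
            - (((v :: vs).map List.length).sum + gap * ((v :: vs).length - 1))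
          = m - (((w :: v :: vs).map List.length).sum
                  + gap * ((w :: v :: vs).length - 1)) := by
        rw [hmul]
        simp only [List.map_cons, List.sum_cons, List.length_cons, Nat.add_sub_cancel]
        omega
      rw [hcnt]
      simp


-- ===== VERDICT (by name: the statement is the Claim_ definition above) =====
theorem reorder_space_spec : Claim_unchanged_reorder_space := by
  intro text _ hD
  unfold D_reorder_space at hD
  by_cases hnil : text.toList = []
  · simp only [reorder_space, reorder_space_alt, hnil]
    decide
  · simp only [reorder_space, reorder_space_alt]
    obtain ⟨hw, hs⟩ := loopA_spec text.toList 0 [] []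
    simp only [List.nil_append, zero_add] at hw hs
    rw [hw, hs, scanWords_eq text.toList.length text.toList (le_refl _)]
    have hex : ∃ c ∈ text.toList, c ≠ ' ' := by
      by_contra hcon
      rw [not_exists] at hcon
      simp only [not_and, ne_eq, not_not] at hcon
      exact hD ⟨hnil, hcon⟩
    have hne := wordsFrom_ne_nil text.toList [] (Or.inr hex)
    have hsum := sum_len_wordsFrom text.toList []
    simp only [List.length_nil, zero_add] at hsum
    set l := text.toList with hl
    set ws := wordsFrom [] l with hws
    have hk : 1 ≤ ws.length := by
      cases hwsn : ws with
      | nil => exact absurd hwsn hne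
      | cons a b => simp
    by_cases hk1 : ws.length = 1
    · -- single word: A takes the 'required == 0' branch, B uses gap 0
      rw [if_pos (by rw [hk1]; norm_num), if_neg (by omega)]
      have hB := place_spec 0 ws [] l.length (by simp; omega)
      simp only [List.nil_append, List.length_nil] at hB
      rw [hB]
      have hc : l.length - ((ws.map List.length).sum + 0 * (ws.length - 1)) = l.count ' ' := by
        omega
      rw [hc]
      simp [PySem.List.pyRepeat_singleton]
    · -- at least two words
      have hk2 : 2 ≤ ws.length := by omega
      rw [if_neg (by
        intro hcon
        have : (ws.length : Int) = 1 := by omega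
        exact hk1 (by exact_mod_cast this)), if_pos (by omega)]
      have hcast : ((ws.length : Int) - 1) = ((ws.length - 1 : Nat) : Int) := by omega
      rw [hcast, PySem.Int.floordiv_natCast, PySem.Int.mod_natCast]
      have hgap : (l.length - (ws.map List.length).sum) / (ws.length - 1)
          = l.count ' ' / (ws.length - 1) := by congr 1; omega
      rw [hgap]
      have hdm := Nat.div_add_mod (l.count ' ') (ws.length - 1)
      have hcomm : (l.count ' ' / (ws.length - 1)) * (ws.length - 1)
          = (ws.length - 1) * (l.count ' ' / (ws.length - 1)) := Nat.mul_comm _ _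
      have hcond : (ws.map List.length).sum
          + (l.count ' ' / (ws.length - 1)) * (ws.length - 1) ≤ l.length := by
        have h1 : (l.count ' ' / (ws.length - 1)) * (ws.length - 1) ≤ l.count ' ' :=
          Nat.div_mul_le_self _ _
        omega
      have hB := place_spec (l.count ' ' / (ws.length - 1)) ws [] l.length hcond
      simp only [List.nil_append, List.length_nil] at hB
      rw [hB]
      have hc : l.length - ((ws.map List.length).sum
            + (l.count ' ' / (ws.length - 1)) * (ws.length - 1))
          = l.count ' ' % (ws.length - 1) := by omega
      rw [hc]
      have h1 : ((l.count ' ' : Int) / ((ws.length - 1 : Nat) : Int)).toNat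
          = l.count ' ' / (ws.length - 1) := by
        rw [← Int.natCast_div]; exact Int.toNat_natCast _
      have h2 : ((l.count ' ' : Int) % ((ws.length - 1 : Nat) : Int)).toNat
          = l.count ' ' % (ws.length - 1) := by
        rw [← Int.natCast_emod]; exact Int.toNat_natCast _
      simp [PySem.List.pyRepeat_singleton, h1, h2]

theorem reorder_space_changed : Claim_changed_reorder_space := by
  unfold Claim_changed_reorder_space
  refine ⟨by decide, ⟨by decide, fun c hc => ?_⟩, by decide, by decide, by decide⟩
  rw [show pvDiffWitness_reorder_space.toList = [' '] from rfl] at hc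
  simpa using hc

theorem reorder_space_tight : Claim_exact_reorder_space := by
  intro text _ hD hcon
  obtain ⟨hnil, hall⟩ := hD
  have hlen := congrArg (fun s => s.toList.length) hcon
  simp only [reorder_space, reorder_space_alt] at hlen
  obtain ⟨hw, hs⟩ := loopA_spec text.toList 0 [] []
  simp only [List.nil_append, zero_add] at hw hs
  have hwords : wordsFrom [] text.toList = [] := wordsFrom_nil_of_all_space text.toList hall
  rw [hw, hs, scanWords_eq text.toList.length text.toList (le_refl _), hwords] at hlen
  have hmod : PySem.Int.mod (text.toList.count ' ' : Int) (-1) = 0 := by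
    have := PySem.Int.mod_neg_bounds (a := (text.toList.count ' ' : Int)) (b := -1) (by norm_num)
    omega
  simp only [List.length_nil, Nat.cast_zero, zero_sub, List.foldl_nil] at hlen
  rw [if_neg (by norm_num), hmod] at hlen
  simp [PySem.Chars.join_nil, PySem.List.pyRepeat_singleton] at hlen
  exact hnil (List.length_eq_zero_iff.mp hlen.symm)
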